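-- pv_equiv track=rewrite | github.com/bluepenguin02/CodingInterviewPrep | LeetCode/Using_a_Robot_to_Print_the_Lexicographically_Smalles_String.py | robotWithString2
-- ===== SOURCE A (Python) =====
-- def robotWithString2(s: str) -> str:
--     s_enum = [(c, i) for i, c in enumerate(s)]
--     s_enum.sort()
--
--     t = []
--     result = []
--     offset = 0
--     enum_idx = 0
--     while enum_idx < len(s_enum):
--         while t and t[-1] <= s_enum[enum_idx][0]:
--             result.append(t.pop())
--         if not t or t and s_enum[enum_idx][0] < t[-1]:
--             c, i = s_enum[enum_idx]
--             enum_idx += 1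
--             t.extend([*s[offset:i+1]])
--             offset = i+1
--             while enum_idx < len(s_enum) and s_enum[enum_idx][1] < offset:
--                 enum_idx += 1
--
--     if t:
--         result.extend(reversed(t))
--
--     return ''.join(result)
-- ===== SOURCE B (Python) =====
-- def robotWithString2(s: str) -> str:
--     # one right-to-left pass pairs each char with the minimum of the chars after it,
--     # then one left-to-right stack pass: push, pop while top <= min of the rest
--     pairs = []
--     m = None
--     for c in reversed(s):
--         pairs.append((c, m))
--         m = c if m is None or c < m else m
--     pairs.reverse()
--
--     res = []
--     stack = []
--     for c, m in pairs:
--         stack.append(c)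
--         while stack and m is not None and stack[-1] <= m:
--             res.append(stack.pop())
--     while stack:
--         res.append(stack.pop())
--     return ''.join(res)
-- ===== Notes on version B (the rewrite author's own statement) =====
-- stated objective: faster
-- what changed: Replaced A's sort of all (char,index) pairs plus a pointer-skipping scan over the sorted list by two linear passes: one right-to-left pass pairing each character with the minimum of the characters after it, then one stack pass that pops while the top is <= that suffix minimum.
import Mathlib
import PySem

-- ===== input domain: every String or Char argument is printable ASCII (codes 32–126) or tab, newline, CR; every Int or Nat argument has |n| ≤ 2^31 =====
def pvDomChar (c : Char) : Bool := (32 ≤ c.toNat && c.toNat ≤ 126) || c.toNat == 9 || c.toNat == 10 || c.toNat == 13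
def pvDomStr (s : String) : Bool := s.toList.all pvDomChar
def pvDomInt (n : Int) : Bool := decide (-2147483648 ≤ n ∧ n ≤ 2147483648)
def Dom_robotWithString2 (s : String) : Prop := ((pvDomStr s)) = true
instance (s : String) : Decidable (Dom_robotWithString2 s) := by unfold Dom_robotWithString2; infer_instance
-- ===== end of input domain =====

-- B replaces A's sort of (char,index) pairs by two linear passes (suffix minima, then one
-- stack pass); proved to return the same string on every input.

-- ===== PORT A =====
-- A keeps the robot's stack `t` as a Python list with the top at the end; the ports keep the
-- top at the HEAD of the Lean list (t[-1] = head, t.pop() = drop the head, extend = push each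
-- sliced char on top in order = reversed slice consed on), so `reversed(t)` is the list itself.

-- `while t and t[-1] <= c: result.append(t.pop())` — returns (popped chars in pop order, rest)
def pvAPop (c : Char) (t : List Char) : List Char × List Char :=
  match t with
  | [] => ([], [])
  | x :: xs => if x ≤ c then (x :: (pvAPop c xs).1, (pvAPop c xs).2) else ([], x :: xs)

-- `while enum_idx < len(s_enum) and s_enum[enum_idx][1] < offset: enum_idx += 1`
def pvASkip (se : List (Char × Int)) (idx : Nat) (offset : Int) : Nat :=
  match h : se[idx]? with
  | some p => if p.2 < offset then pvASkip se (idx + 1) offset else idx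
  | none => idx
termination_by se.length - idx
decreasing_by
  have : idx < se.length := by
    by_contra hc
    simp [List.getElem?_eq_none (by omega : se.length ≤ idx)] at h
  omega

theorem pvASkip_ge (se : List (Char × Int)) (idx : Nat) (offset : Int) :
    idx ≤ pvASkip se idx offset := by
  fun_induction pvASkip se idx offset <;> omega

-- `not t or (t and c < t[-1])` (stack top at head)
def pvATopOk (c : Char) (t : List Char) : Bool :=
  match t with | [] => true | x :: _ => decide (c < x)

-- the outer `while enum_idx < len(s_enum)` loop of A
def pvALoop (l : List Char) (se : List (Char × Int)) (idx : Nat)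
    (t res : List Char) (offset : Int) : List Char :=
  match h : se[idx]? with
  | none => res ++ t                        -- loop done; `result.extend(reversed(t))`
  | some ci =>
    let pr := pvAPop ci.1 t
    if pvATopOk ci.1 pr.2 then
      pvALoop l se (pvASkip se (idx + 1) (ci.2 + 1))
        ((PySem.List.slice l (some offset) (some (ci.2 + 1))).reverse ++ pr.2)
        (res ++ pr.1) (ci.2 + 1)
    else
      res ++ pr.2  -- unreachable: after the pop-loop the stack top exceeds ci.1 (Python would loop forever here)
termination_by se.length - idx
decreasing_by
  have h1 : idx < se.length := by
    by_contra hc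
    simp [List.getElem?_eq_none (by omega : se.length ≤ idx)] at h
  have h2 := pvASkip_ge se (idx + 1) (ci.2 + 1)
  omega

def robotWithString2 (s : String) : String :=
  let l := s.toList
  let s_enum := PySem.List.sorted2 ((PySem.List.enumerate l 0).map (fun p => (p.2, p.1)))
    (·.1) (·.2) false
  String.ofList (pvALoop l s_enum 0 [] [] 0)

-- ===== PORT B =====
-- stack kept top-at-head here too (append/pop at the Python end = cons/uncons at the head)

-- `while stack and m is not None and stack[-1] <= m: res.append(stack.pop())`
def pvBPop (m : Option Char) (st : List Char) : List Char × List Char :=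
  match st with
  | [] => ([], [])
  | x :: xs =>
    match m with
    | none => ([], x :: xs)
    | some mm =>
      if x ≤ mm then (x :: (pvBPop m xs).1, (pvBPop m xs).2) else ([], x :: xs)

-- body of `for c in reversed(s): pairs.append((c, m)); m = c if m is None or c < m else m`
def pvBPairsStep (acc : List (Char × Option Char) × Option Char) (c : Char) :
    List (Char × Option Char) × Option Char :=
  (acc.1 ++ [(c, acc.2)],
   match acc.2 with
   | none => some c
   | some m => if c < m then some c else some m)

-- `for c, m in pairs: stack.append(c); <pop>` then the final `while stack` drain
def pvBLoop (pairs : List (Char × Option Char)) (st res : List Char) : List Char :=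
  match pairs with
  | [] => res ++ st
  | (c, m) :: rest =>
    let pr := pvBPop m (c :: st)
    pvBLoop rest pr.2 (res ++ pr.1)

def robotWithString2_alt (s : String) : String :=
  let pr := s.toList.reverse.foldl pvBPairsStep ([], none)
  String.ofList (pvBLoop pr.1.reverse [] [])

-- ===== PRECONDITION & SPEC =====
def Spec_robotWithString2 (s : String) (out : String) : Prop := out = robotWithString2_alt s
instance (s : String) (out : String) : Decidable (Spec_robotWithString2 s out) := by unfold Spec_robotWithString2; infer_instance

-- ===== CLAIM (what is proved, stated in full; the proofs are below) =====
def Claim_equal_robotWithString2 : Prop := ∀ (s : String), Dom_robotWithString2 s → Spec_robotWithString2 s (robotWithString2 s)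

-- ===== LEMMAS AND PROOFS =====

-- ---- shared shape of the two pop loops, and their basic properties ----

theorem pvAPop_eq_pvBPop (c : Char) (t : List Char) :
    pvAPop c t = pvBPop (some c) t := by
  induction t with
  | nil => rfl
  | cons x xs ih => simp [pvAPop, pvBPop, ih]

theorem pvBPop_none (t : List Char) : pvBPop none t = ([], t) := by
  cases t <;> rfl

-- after popping, the new top (if any) is strictly above c
theorem pvBPop_post (c : Char) (t : List Char) :
    pvATopOk c (pvBPop (some c) t).2 = true := by
  induction t with
  | nil => rfl
  | cons x xs ih =>
    by_cases hx : x ≤ c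
    · simpa [pvBPop, hx] using ih
    · simp [pvBPop, pvATopOk, hx]
      exact lt_of_not_ge hx

theorem pvBPop_idem (c : Char) (t : List Char) :
    pvBPop (some c) (pvBPop (some c) t).2 = ([], (pvBPop (some c) t).2) := by
  induction t with
  | nil => rfl
  | cons x xs ih =>
    by_cases hx : x ≤ c
    · simpa [pvBPop, hx] using ih
    · simp [pvBPop, hx]

-- ---- proof-side normal form: pair each char with the min of the chars after it ----

def pairsOf : List Char → List (Char × Option Char)
  | [] => []
  | c :: tl => (c, tl.min?) :: pairsOf tl

theorem pvBPairs_spec (l : List Char) :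
    l.reverse.foldl pvBPairsStep ([], none) = ((pairsOf l).reverse, l.min?) := by
  induction l with
  | nil => rfl
  | cons c tl ih =>
    rw [List.reverse_cons, List.foldl_append, ih]
    simp only [List.foldl_cons, List.foldl_nil, pvBPairsStep, pairsOf, List.reverse_cons]
    refine Prod.ext rfl ?_
    cases hm : tl.min? with
    | none =>
      have : tl = [] := List.min?_eq_none_iff.mp hm
      subst this; rfl
    | some m =>
      rw [List.min?_cons, hm]
      simp only [Option.elim]
      split_ifs with h
      · simp [min_eq_left h.le]
      · simp [min_eq_right (le_of_not_gt h)]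

-- the common mathematical core: repeatedly cut the input at the first occurrence of its
-- minimum, push that block, then pop while the top is ≤ the minimum of what remains
def MM (t res : List Char) (l : List Char) : List Char :=
  match hm : l.min? with
  | none => res ++ t
  | some c =>
    let i := l.idxOf c
    let pr := pvBPop (l.drop (i + 1)).min? ((l.take (i + 1)).reverse ++ t)
    MM pr.2 (res ++ pr.1) (l.drop (i + 1))
termination_by l.length
decreasing_by
  have : l ≠ [] := by rintro rfl; simp at hm
  have : 0 < l.length := List.length_pos_iff.mpr this
  simp [List.length_drop]; omega

-- A's loop with the pops done at the start of each round instead of at the end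
def M2 (t res : List Char) (l : List Char) : List Char :=
  match hm : l.min? with
  | none => res ++ t
  | some c =>
    let pr := pvAPop c t
    let i := l.idxOf c
    M2 ((l.take (i + 1)).reverse ++ pr.2) (res ++ pr.1) (l.drop (i + 1))
termination_by l.length
decreasing_by
  have : l ≠ [] := by rintro rfl; simp at hm
  have : 0 < l.length := List.length_pos_iff.mpr this
  simp [List.length_drop]; omega

theorem MM_nil (t res : List Char) (l : List Char) (h : l.min? = none) :
    MM t res l = res ++ t := by
  rw [MM.eq_def]; split <;> simp_all

theorem MM_some (t res : List Char) (l : List Char) (c : Char) (h : l.min? = some c) :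
    MM t res l =
      MM (pvBPop (l.drop (l.idxOf c + 1)).min? ((l.take (l.idxOf c + 1)).reverse ++ t)).2
        (res ++ (pvBPop (l.drop (l.idxOf c + 1)).min? ((l.take (l.idxOf c + 1)).reverse ++ t)).1)
        (l.drop (l.idxOf c + 1)) := by
  rw [MM.eq_def]; split <;> simp_all

theorem M2_nil (t res : List Char) (l : List Char) (h : l.min? = none) :
    M2 t res l = res ++ t := by
  rw [M2.eq_def]; split <;> simp_all

theorem M2_some (t res : List Char) (l : List Char) (c : Char) (h : l.min? = some c) :
    M2 t res l =
      M2 ((l.take (l.idxOf c + 1)).reverse ++ (pvAPop c t).2) (res ++ (pvAPop c t).1)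
        (l.drop (l.idxOf c + 1)) := by
  rw [M2.eq_def]; split <;> simp_all

-- pushing a char strictly above the minimum of the rest commutes with one MM cut
theorem MM_commute (tl : List Char) (a c : Char) (t res : List Char)
    (h : tl.min? = some c) (ha : c < a) :
    MM (a :: t) res tl = MM t res (a :: tl) := by
  have hmin : (a :: tl).min? = some c := by
    rw [List.min?_cons, h]
    simp [Option.elim, min_eq_right ha.le]
  have hne : a ≠ c := (ne_of_gt ha)
  have hidx : (a :: tl).idxOf c = tl.idxOf c + 1 := by
    simp [hne]
  rw [MM_some _ _ _ _ h, MM_some _ _ _ _ hmin, hidx]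
  have htake : ((a :: tl).take (tl.idxOf c + 1 + 1)).reverse ++ t
      = (tl.take (tl.idxOf c + 1)).reverse ++ (a :: t) := by
    simp [List.take_succ_cons]
  have hdrop : (a :: tl).drop (tl.idxOf c + 1 + 1) = tl.drop (tl.idxOf c + 1) := by
    simp [List.drop_succ_cons]
  rw [htake, hdrop]

theorem pvBLoop_eq_MM (l : List Char) : ∀ t res, pvBLoop (pairsOf l) t res = MM t res l := by
  induction l with
  | nil => intro t res; rw [MM_nil _ _ _ (by simp)]; rfl
  | cons a tl ih =>
    intro t res
    show pvBLoop (pairsOf tl) (pvBPop tl.min? (a :: t)).2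
        (res ++ (pvBPop tl.min? (a :: t)).1) = MM t res (a :: tl)
    rw [ih]
    cases hm : tl.min? with
    | none =>
      have : tl = [] := List.min?_eq_none_iff.mp hm
      subst this
      rw [pvBPop_none, MM_nil _ _ _ rfl, MM_some _ _ _ a (by simp)]
      norm_num [pvBPop_none]
      rw [MM_nil _ _ _ rfl]
    | some m =>
      by_cases ham : a ≤ m
      · have hmin : (a :: tl).min? = some a := by
          rw [List.min?_cons, hm]; simp [Option.elim, min_eq_left ham]
        rw [MM_some _ _ _ _ hmin]
        simp [hm]
      · have hma : m < a := lt_of_not_ge ham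
        have hpop : pvBPop (some m) (a :: t) = ([], a :: t) := by
          simp [pvBPop, ham]
        simp only [hpop]
        simpa using MM_commute tl a m t res hm hma

theorem M2_pop (l : List Char) (t res : List Char) :
    M2 t res l = M2 (pvBPop l.min? t).2 (res ++ (pvBPop l.min? t).1) l := by
  cases hm : l.min? with
  | none => rw [pvBPop_none]; simp
  | some c =>
    rw [M2_some _ _ _ _ hm, M2_some _ _ _ _ hm]
    rw [pvAPop_eq_pvBPop, pvAPop_eq_pvBPop, pvBPop_idem]
    simp

theorem M2_eq_MM (l : List Char) : ∀ t res, pvBPop l.min? t = ([], t) → M2 t res l = MM t res l := by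
  induction hn : l.length using Nat.strong_induction_on generalizing l with
  | _ n ih =>
    intro t res hno
    cases hm : l.min? with
    | none => rw [M2_nil _ _ _ hm, MM_nil _ _ _ hm]
    | some c =>
      have hlen : 0 < l.length := by
        rcases l with _ | _
        · simp at hm
        · simp
      rw [M2_some _ _ _ _ hm, MM_some _ _ _ _ hm]
      rw [pvAPop_eq_pvBPop]
      rw [hm] at hno
      rw [hno]
      simp only [List.append_nil]
      have hlt : (l.drop (l.idxOf c + 1)).length < n := by
        subst hn; simp [List.length_drop]; omega
      rw [M2_pop]
      refine ih _ hlt _ rfl _ _ ?_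
      cases hmr : (l.drop (l.idxOf c + 1)).min? with
      | none => simp [pvBPop_none]
      | some c' => exact pvBPop_idem c' _

-- ---- the sorted enumeration and A's scan ----

def pvLt (a b : Char × Int) : Bool :=
  decide (a.1 < b.1) || (!decide (b.1 < a.1) && decide (a.2 < b.2))

def pvE (l : List Char) : List (Char × Int) :=
  (PySem.List.enumerate l 0).map (fun p => (p.2, p.1))

theorem pvLt_iff (a b : Char × Int) :
    pvLt a b = true ↔ (a.1 < b.1 ∨ (¬ b.1 < a.1 ∧ a.2 < b.2)) := by
  simp [pvLt, Bool.or_eq_true, Bool.and_eq_true]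

theorem pvLt_false_iff (a b : Char × Int) :
    pvLt a b = false ↔ (¬ a.1 < b.1 ∧ (b.1 < a.1 ∨ ¬ a.2 < b.2)) := by
  rw [← Bool.not_eq_true, pvLt_iff]
  tauto

theorem pvLt_asymm (a b : Char × Int) (h : pvLt a b = true) : pvLt b a = false := by
  rw [pvLt_iff] at h
  rw [pvLt_false_iff]
  rcases h with h | ⟨h1, h2⟩
  · exact ⟨asymm h, Or.inl h⟩
  · exact ⟨h1, Or.inr (asymm h2)⟩

theorem pvLt_trans_nf (x y z : Char × Int) (hxy : pvLt x y = true) (hzy : pvLt z y = false) :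
    pvLt z x = false := by
  rw [pvLt_iff] at hxy
  rw [pvLt_false_iff] at hzy ⊢
  obtain ⟨hz1, hz2⟩ := hzy
  rcases hxy with h | ⟨h1, h2⟩
  · have hxz : x.1 < z.1 := lt_of_lt_of_le h (le_of_not_gt hz1)
    exact ⟨asymm hxz, Or.inl hxz⟩
  · have hxle : x.1 ≤ y.1 := le_of_not_gt h1
    have hyle : y.1 ≤ z.1 := le_of_not_gt hz1
    refine ⟨fun hc => absurd (lt_of_lt_of_le hc hxle) (not_lt_of_ge hyle), ?_⟩
    by_cases hx1 : x.1 < z.1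
    · exact Or.inl hx1
    · have hyz : ¬ y.1 < z.1 := by
        intro hc
        exact hx1 (lt_of_le_of_lt hxle hc)
      rcases hz2 with hc | hc
      · exact absurd hc hyz
      · exact Or.inr (fun hz => hc (lt_trans hz h2))

theorem insertBy_pairwise (x : Char × Int) (acc : List (Char × Int))
    (h : acc.Pairwise (fun a b => pvLt b a = false)) :
    (PySem.List.insertBy pvLt x acc).Pairwise (fun a b => pvLt b a = false) := by
  induction acc with
  | nil => simp [PySem.List.insertBy]
  | cons y ys ih =>
    rw [List.pairwise_cons] at h
    obtain ⟨hy, hys⟩ := h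
    by_cases hb : pvLt x y = true
    · rw [show PySem.List.insertBy pvLt x (y :: ys) = x :: y :: ys by
        simp [PySem.List.insertBy, hb]]
      refine List.Pairwise.cons ?_ (List.Pairwise.cons hy hys)
      intro z hz
      rcases List.mem_cons.mp hz with rfl | hz'
      · exact pvLt_asymm _ _ hb
      · exact pvLt_trans_nf x y z hb (hy z hz')
    · rw [show PySem.List.insertBy pvLt x (y :: ys) = y :: PySem.List.insertBy pvLt x ys by
        simp [PySem.List.insertBy, hb]]
      refine List.Pairwise.cons ?_ (ih hys)
      intro z hz
      rcases (PySem.List.mem_insertBy pvLt x z ys).mp hz with rfl | hz'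
      · exact Bool.not_eq_true _ ▸ (by simpa using hb)
      · exact hy z hz'

theorem foldl_insertBy_pairwise (xs : List (Char × Int)) :
    ∀ acc, acc.Pairwise (fun a b => pvLt b a = false) →
      (xs.foldl (fun acc x => PySem.List.insertBy pvLt x acc) acc).Pairwise
        (fun a b => pvLt b a = false) := by
  induction xs with
  | nil => intro acc h; exact h
  | cons x xs ih =>
    intro acc h
    exact ih _ (insertBy_pairwise x acc h)

theorem sorted2_pairwise (xs : List (Char × Int)) :
    (PySem.List.sorted2 xs (·.1) (·.2) false).Pairwise (fun a b => pvLt b a = false) := by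
  have : PySem.List.sorted2 xs (·.1) (·.2) false
      = xs.foldl (fun acc x => PySem.List.insertBy pvLt x acc) [] := rfl
  rw [this]
  exact foldl_insertBy_pairwise xs [] (by simp)

theorem mem_pvE (l : List Char) (p : Char × Int) :
    p ∈ pvE l ↔ ∃ (k : Nat) (hk : k < l.length), p = (l[k], (k : Int)) := by
  simp only [pvE, List.mem_map, PySem.List.mem_enumerate_iff]
  constructor
  · rintro ⟨q, ⟨k, hk, rfl⟩, rfl⟩
    exact ⟨k, hk, by simp⟩
  · rintro ⟨k, hk, rfl⟩
    exact ⟨((k : Int), l[k]), ⟨k, hk, by simp⟩, rfl⟩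

theorem pvASkip_inv (se : List (Char × Int)) (offset : Int) :
    ∀ idx, (∀ k (hk : k < se.length), k < idx → se[k].2 < offset) →
      (∀ k (hk : k < se.length), k < pvASkip se idx offset → se[k].2 < offset) ∧
      (∀ p, se[pvASkip se idx offset]? = some p → offset ≤ p.2) := by
  intro idx
  fun_induction pvASkip se idx offset with
  | case1 idx p h hlt ih =>
    intro hinv
    refine ih ?_
    intro k hk hkidx
    rcases Nat.lt_or_ge k idx with hk2 | hk2
    · exact hinv k hk hk2
    · have : k = idx := by omega
      subst this
      rw [List.getElem?_eq_getElem hk] at h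
      rw [Option.some.inj h]
      exact hlt
  | case2 idx p h hlt =>
    intro hinv
    refine ⟨hinv, ?_⟩
    intro q hq
    rw [h] at hq
    obtain rfl : p = q := Option.some.inj hq
    exact le_of_not_gt hlt
  | case3 idx h =>
    intro hinv
    refine ⟨hinv, ?_⟩
    intro q hq
    rw [h] at hq
    exact absurd hq (by simp)

def pvSE (l : List Char) : List (Char × Int) :=
  PySem.List.sorted2 (pvE l) (·.1) (·.2) false

theorem pvSE_pos (l : List Char) (j : Nat) (hj : j < l.length) :
    ∃ (k : Nat) (hk : k < (pvSE l).length), (pvSE l)[k] = (l[j], (j : Int)) := by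
  have hmem : (l[j], (j : Int)) ∈ pvSE l :=
    ((PySem.List.sorted2_perm _ _ _ _).mem_iff).mpr ((mem_pvE _ _).mpr ⟨j, hj, rfl⟩)
  exact List.getElem_of_mem hmem

theorem idxOf_eq_of (l : List Char) (c : Char) (n : Nat) (hn : n < l.length)
    (h1 : l[n] = c) (h2 : ∀ q (hq : q < l.length), q < n → l[q] ≠ c) : l.idxOf c = n := by
  induction l generalizing n with
  | nil => simp at hn
  | cons x xs ih =>
    cases n with
    | zero =>
      simp only [List.getElem_cons_zero] at h1
      subst h1
      rw [List.idxOf_cons]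
      simp
    | succ m =>
      have hx : x ≠ c := by
        have := h2 0 (by omega) (by omega)
        simpa using this
      rw [List.idxOf_cons, show (x == c) = false from beq_eq_false_iff_ne.mpr hx]
      simp only [cond_false]
      have : xs.idxOf c = m := by
        refine ih m (by simpa using hn) (by simpa using h1) ?_
        intro q hq hqm
        have := h2 (q + 1) (by simpa using Nat.succ_lt_succ hq) (by omega)
        simpa using this
      omega

-- the entry A's scan picks is the first occurrence of the minimum of the remaining suffix
theorem pick_spec (l : List Char) (idx : Nat) (o : Int) (ho : 0 ≤ o) (c : Char) (i : Int)
    (h3 : ∀ k (hk : k < (pvSE l).length), k < idx → ((pvSE l)[k]).2 < o)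
    (hidx : (pvSE l)[idx]? = some (c, i)) (hcur : o ≤ i) :
    ∃ k0 : Nat, i = (k0 : Int) ∧ k0 < l.length ∧ o.toNat ≤ k0 ∧
      (l.drop o.toNat).min? = some c ∧ (l.drop o.toNat).idxOf c = k0 - o.toNat := by
  have hidxlt : idx < (pvSE l).length := by
    by_contra hc
    rw [List.getElem?_eq_none (by omega)] at hidx
    exact absurd hidx (by simp)
  have hse : (pvSE l)[idx] = (c, i) := by
    rw [List.getElem?_eq_getElem hidxlt] at hidx
    exact Option.some.inj hidx
  have hmemE : (c, i) ∈ pvE l := by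
    have : (c, i) ∈ pvSE l := hse ▸ List.getElem_mem hidxlt
    exact ((PySem.List.sorted2_perm _ _ _ _).mem_iff).mp this
  obtain ⟨k0, hk0l, heq⟩ := (mem_pvE _ _).mp hmemE
  have hc0 : c = l[k0] := congrArg Prod.fst heq
  have hik : i = (k0 : Int) := congrArg Prod.snd heq
  have hok0 : o.toNat ≤ k0 := by omega
  have hpw : ∀ (p q : Nat) (hp : p < (pvSE l).length) (hq : q < (pvSE l).length), p < q →
      pvLt (pvSE l)[q] (pvSE l)[p] = false :=
    (List.pairwise_iff_getElem).mp (sorted2_pairwise (pvE l))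
  -- any suffix position's entry sits at sorted position ≥ idx
  have hpos : ∀ j (hj : j < l.length), o.toNat ≤ j →
      ∃ (k : Nat) (hk : k < (pvSE l).length), idx ≤ k ∧ (pvSE l)[k] = (l[j], (j : Int)) := by
    intro j hj hoj
    obtain ⟨k, hk, hkeq⟩ := pvSE_pos l j hj
    refine ⟨k, hk, ?_, hkeq⟩
    by_contra hc
    have := h3 k hk (by omega)
    rw [hkeq] at this
    omega
  have hmin : ∀ j (hj : j < l.length), o.toNat ≤ j → c ≤ l[j] := by
    intro j hj hoj
    obtain ⟨k, hk, hik2, hkeq⟩ := hpos j hj hoj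
    rcases Nat.eq_or_lt_of_le hik2 with rfl | hlt
    · rw [hse] at hkeq
      exact (congrArg Prod.fst hkeq).le
    · have hR := hpw idx k hidxlt hk hlt
      rw [hse, hkeq, pvLt_false_iff] at hR
      exact le_of_not_gt hR.1
  have hfirst : ∀ j (hj : j < l.length), o.toNat ≤ j → j < k0 → l[j] ≠ c := by
    intro j hj hoj hjk0 hne
    obtain ⟨k, hk, hik2, hkeq⟩ := hpos j hj hoj
    rcases Nat.eq_or_lt_of_le hik2 with rfl | hlt
    · rw [hse] at hkeq
      have := congrArg Prod.snd hkeq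
      simp only at this
      omega
    · have hR := hpw idx k hidxlt hk hlt
      rw [hse, hkeq, pvLt_false_iff] at hR
      obtain ⟨hR1, hR2⟩ := hR
      rcases hR2 with hR2 | hR2
      · simp only [hne, hc0] at hR2
        exact absurd hR2 (lt_irrefl _)
      · simp only at hR2
        omega
  have hlendrop : k0 - o.toNat < (l.drop o.toNat).length := by
    simp [List.length_drop]; omega
  have hgd : (l.drop o.toNat)[k0 - o.toNat]'hlendrop = l[k0] := by
    rw [List.getElem_drop]
    congr 1
    omega
  refine ⟨k0, hik, hk0l, hok0, ?_, ?_⟩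
  · rw [List.min?_eq_some_iff]
    constructor
    · rw [hc0, ← hgd]
      exact List.getElem_mem hlendrop
    · intro b hb
      obtain ⟨q, hq, rfl⟩ := List.mem_iff_getElem.mp hb
      rw [List.getElem_drop]
      exact hmin _ (by simp [List.length_drop] at hq; omega) (by omega)
  · refine idxOf_eq_of _ _ _ hlendrop (by rw [hgd, hc0]) ?_
    intro q hq hqk
    rw [List.getElem_drop]
    exact hfirst _ (by simp [List.length_drop] at hq; omega) (by omega) (by omega)

theorem pvALoop_none (l : List Char) (se : List (Char × Int)) (idx : Nat)
    (t res : List Char) (o : Int) (h : se[idx]? = none) :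
    pvALoop l se idx t res o = res ++ t := by
  rw [pvALoop.eq_def]
  split <;> simp_all

theorem pvALoop_some (l : List Char) (se : List (Char × Int)) (idx : Nat)
    (t res : List Char) (o : Int) (c : Char) (i : Int) (h : se[idx]? = some (c, i)) :
    pvALoop l se idx t res o =
      if pvATopOk c (pvAPop c t).2 then
        pvALoop l se (pvASkip se (idx + 1) (i + 1))
          ((PySem.List.slice l (some o) (some (i + 1))).reverse ++ (pvAPop c t).2)
          (res ++ (pvAPop c t).1) (i + 1)
      else res ++ (pvAPop c t).2 := by
  rw [pvALoop.eq_def]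
  split <;> simp_all

theorem pvALoop_none_case (l : List Char) (idx : Nat) (t res : List Char) (o : Int)
    (h3 : ∀ k (hk : k < (pvSE l).length), k < idx → ((pvSE l)[k]).2 < o) (ho : 0 ≤ o)
    (hnone : (pvSE l)[idx]? = none) :
    pvALoop l (pvSE l) idx t res o = M2 t res (l.drop o.toNat) := by
  have hlen : (pvSE l).length ≤ idx := List.getElem?_eq_none_iff.mp hnone
  have hdrop : l.drop o.toNat = [] := by
    rw [List.drop_eq_nil_iff]
    by_contra hc
    rw [Nat.not_le] at hc
    obtain ⟨k, hk, hkeq⟩ := pvSE_pos l o.toNat hc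
    have := h3 k hk (by omega)
    rw [hkeq] at this
    simp only at this
    omega
  rw [hdrop, M2_nil _ _ _ (by simp), pvALoop_none _ _ _ _ _ _ hnone]

theorem pvALoop_eq_M2 (l : List Char) :
    ∀ (idx : Nat) (t res : List Char) (o : Int),
      (∀ k (hk : k < (pvSE l).length), k < idx → ((pvSE l)[k]).2 < o) →
      (∀ p, (pvSE l)[idx]? = some p → o ≤ p.2) →
      0 ≤ o →
      pvALoop l (pvSE l) idx t res o = M2 t res (l.drop o.toNat) := by
  suffices H : ∀ (n idx : Nat) (t res : List Char) (o : Int),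
      (pvSE l).length - idx ≤ n →
      (∀ k (hk : k < (pvSE l).length), k < idx → ((pvSE l)[k]).2 < o) →
      (∀ p, (pvSE l)[idx]? = some p → o ≤ p.2) →
      0 ≤ o →
      pvALoop l (pvSE l) idx t res o = M2 t res (l.drop o.toNat) by
    exact fun idx t res o h3 h5 ho => H (pvSE l).length idx t res o (by omega) h3 h5 ho
  intro n
  induction n with
  | zero =>
    intro idx t res o hn h3 h5 ho
    exact pvALoop_none_case l idx t res o h3 ho (List.getElem?_eq_none (by omega))
  | succ n ih =>
    intro idx t res o hn h3 h5 ho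
    cases hq : (pvSE l)[idx]? with
    | none => exact pvALoop_none_case l idx t res o h3 ho hq
    | some ci =>
      obtain ⟨c, i⟩ := ci
      have hidxlt : idx < (pvSE l).length := by
        by_contra hc
        rw [List.getElem?_eq_none (by omega)] at hq
        exact absurd hq (by simp)
      have hse : (pvSE l)[idx] = (c, i) := by
        rw [List.getElem?_eq_getElem hidxlt] at hq
        exact Option.some.inj hq
      obtain ⟨k0, hik, hk0l, hok0, hmin, hidxof⟩ :=
        pick_spec l idx o ho c i h3 hq (h5 _ hq)
      subst hik
      rw [pvALoop_some _ _ _ _ _ _ _ _ hq, pvAPop_eq_pvBPop, if_pos (pvBPop_post c t)]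
      rw [M2_some _ _ _ _ hmin, hidxof, pvAPop_eq_pvBPop]
      have hslice : PySem.List.slice l (some o) (some ((k0 : Int) + 1))
          = (l.drop o.toNat).take (k0 - o.toNat + 1) := by
        rw [PySem.List.slice_toNat l ho (by omega)]
        congr 1
        omega
      have hdrop2 : (l.drop o.toNat).drop (k0 - o.toNat + 1) = l.drop ((k0 : Int) + 1).toNat := by
        rw [List.drop_drop]
        congr 1
        omega
      rw [hslice, hdrop2]
      -- invariants for the recursive call
      have base3 : ∀ k (hk : k < (pvSE l).length), k < idx + 1 →
          ((pvSE l)[k]).2 < (k0 : Int) + 1 := by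
        intro k hk hki
        rcases Nat.lt_or_ge k idx with hk2 | hk2
        · have := h3 k hk hk2
          have := h5 _ hq
          simp only at this ⊢
          omega
        · have : k = idx := by omega
          subst this
          rw [hse]
          simp
      obtain ⟨h3', h5'⟩ := pvASkip_inv (pvSE l) ((k0 : Int) + 1) (idx + 1) base3
      have hn' : (pvSE l).length - pvASkip (pvSE l) (idx + 1) ((k0 : Int) + 1) ≤ n := by
        have := pvASkip_ge (pvSE l) (idx + 1) ((k0 : Int) + 1)
        omega
      exact ih _ _ _ _ hn' h3' h5' (by omega)
theorem robotWithString2_spec : Claim_equal_robotWithString2 := by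
  intro s _
  unfold Spec_robotWithString2
  have hA := pvALoop_eq_M2 s.toList 0 [] [] 0
    (by intro k hk hk0; omega) ?hcur (by norm_num)
  case hcur =>
    intro p hp
    have hmem : p ∈ pvSE s.toList := List.mem_of_getElem? hp
    have : p ∈ pvE s.toList := (PySem.List.sorted2_perm _ _ _ _).mem_iff.mp hmem
    obtain ⟨k, hk, rfl⟩ := (mem_pvE _ _).mp this
    exact Int.natCast_nonneg k
  have hB : robotWithString2_alt s = String.ofList (MM [] [] s.toList) := by
    simp only [robotWithString2_alt]
    rw [pvBPairs_spec]
    simp only [List.reverse_reverse]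
    rw [pvBLoop_eq_MM]
  have hA' : robotWithString2 s = String.ofList (M2 [] [] s.toList) := by
    simp only [robotWithString2]
    simp only [pvSE, pvE] at hA
    rw [hA]
    simp
  rw [hA', hB, M2_eq_MM _ _ _ (by cases s.toList <;> simp [pvBPop])]
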